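-- pv_equiv track=rewrite | github.com/nao7541/atcoder-practice | work/src/その他/キーエンスプログラミングコンテスト2019_c.py | probrem
-- ===== SOURCE A (Python) =====
-- def probrem(A, B):
--     AB_div = [x - y for (x, y) in zip(A, B)]
--     count_less_than_0 = sum(x<0 for x in AB_div)
--     sum_less_than_0 = sum([i for i in AB_div if i < 0])
--     less_than_0 = [i for i in AB_div if i < 0]
--     more_than_0 = [i for i in AB_div if i > 0]
--     more_than_0.sort(reverse=True)
--     ans = 0
--     if sum(A) < sum(B):
--         return -1
--     if count_less_than_0 == 0:
--         return 0
--     for i in more_than_0: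
--         ans += 1
--         sum_less_than_0 += i
--         if sum_less_than_0 >= 0:
--             break
--
--     return ans + count_less_than_0
-- ===== SOURCE B (Python) =====
-- def probrem(A, B):
--     if sum(A) < sum(B):
--         return -1
--     neg_count = 0
--     deficit = 0
--     pos = []
--     for x, y in zip(A, B):
--         d = x - y
--         if d < 0:
--             neg_count += 1
--             deficit -= d
--         elif d > 0:
--             pos.append(d)
--     if neg_count == 0:
--         return 0
--     pos.sort(reverse=True)
--     # prefix sums of the descending positive diffs
--     prefix = []
--     s = 0
--     for d in pos:
--         s += d
--         prefix.append(s)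
--     # binary search: first index whose prefix sum covers the deficit
--     lo, hi = 0, len(prefix)
--     while lo < hi:
--         mid = (lo + hi) // 2
--         if prefix[mid] >= deficit:
--             hi = mid
--         else:
--             lo = mid + 1
--     k = lo + 1 if lo < len(prefix) else len(prefix)
--     return neg_count + k
-- ===== Notes on version B (the rewrite author's own statement) =====
-- stated objective: alternative
-- what changed: Replaces A's several list-comprehension passes and accumulate-until-covered linear scan with one fused pass computing count/deficit/positives, then a prefix-sum table over the descending positives and a binary search for the first prefix covering the deficit.
import Mathlib
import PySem

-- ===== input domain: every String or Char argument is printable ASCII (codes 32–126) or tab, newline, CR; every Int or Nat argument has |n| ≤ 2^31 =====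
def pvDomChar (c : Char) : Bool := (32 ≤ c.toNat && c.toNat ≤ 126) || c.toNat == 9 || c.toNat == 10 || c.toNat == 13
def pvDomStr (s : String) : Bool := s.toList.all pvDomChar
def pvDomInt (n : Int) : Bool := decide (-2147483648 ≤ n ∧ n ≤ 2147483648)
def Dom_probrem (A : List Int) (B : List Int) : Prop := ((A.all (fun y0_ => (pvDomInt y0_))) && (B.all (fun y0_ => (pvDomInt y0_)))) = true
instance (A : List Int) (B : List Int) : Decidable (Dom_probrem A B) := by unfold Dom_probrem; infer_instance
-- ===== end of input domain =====

-- B re-implements A's accumulate-until-covered scan as a prefix-sum table plus binary search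
-- (same result; objective: alternative decomposition, not speed).

-- ===== PORT A =====
-- the 'for i in more_than_0: ans += 1; sum += i; if sum >= 0: break' loop
def probremLoopA : List Int → Int → Int → Int
  | [], ans, _ => ans
  | i :: rest, ans, s =>
    if s + i ≥ 0 then ans + 1 else probremLoopA rest (ans + 1) (s + i)

def probrem (A : List Int) (B : List Int) : Int :=
  let ABdiv := (A.zip B).map (fun p => p.1 - p.2)
  let countLt0 : Int := (ABdiv.map (fun x => if x < 0 then (1 : Int) else 0)).sum
  let sumLt0 := (ABdiv.filter (fun i => i < 0)).sum
  let _lessThan0 := ABdiv.filter (fun i => i < 0)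
  let moreThan0 := PySem.List.sorted (ABdiv.filter (fun i => i > 0)) (fun x => x) true
  if A.sum < B.sum then -1
  else if countLt0 = 0 then 0
  else probremLoopA moreThan0 0 sumLt0 + countLt0

-- ===== PORT B =====
-- the 'while lo < hi' binary search over the prefix-sum table
def probremBsearch (pre : List Int) (deficit : Int) (lo hi : Nat) : Nat :=
  if _h : lo < hi then
    if pre.getD ((lo + hi) / 2) 0 ≥ deficit then probremBsearch pre deficit lo ((lo + hi) / 2)
    else probremBsearch pre deficit ((lo + hi) / 2 + 1) hi
  else lo
termination_by hi - lo
decreasing_by all_goals omega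

def probrem_alt (A : List Int) (B : List Int) : Int :=
  if A.sum < B.sum then -1
  else
    -- one fused pass over zip(A, B): negative count, deficit, positive diffs
    let st := (A.zip B).foldl
      (fun (st : Int × Int × List Int) p =>
        let d := p.1 - p.2
        if d < 0 then (st.1 + 1, st.2.1 - d, st.2.2)
        else if d > 0 then (st.1, st.2.1, st.2.2 ++ [d])
        else st)
      (0, 0, [])
    let negCount := st.1
    let deficit := st.2.1
    let pos0 := st.2.2
    if negCount = 0 then 0
    else
      let pos := PySem.List.sorted pos0 (fun x => x) true
      -- prefix-sum table (the 'for d in pos: s += d; prefix.append(s)' loop)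
      let pre := (pos.foldl (fun (sp : Int × List Int) d => (sp.1 + d, sp.2 ++ [sp.1 + d])) (0, [])).2
      let lo := probremBsearch pre deficit 0 pre.length
      let k : Int := if lo < pre.length then (lo : Int) + 1 else (pre.length : Int)
      negCount + k

-- ===== PRECONDITION & SPEC =====
def Spec_probrem (A : List Int) (B : List Int) (out : Int) : Prop := out = probrem_alt A B
instance (A : List Int) (B : List Int) (out : Int) : Decidable (Spec_probrem A B out) := by unfold Spec_probrem; infer_instance

-- ===== CLAIM (what is proved, stated in full; the proofs are below) =====
def Claim_equal_probrem : Prop := ∀ (A : List Int) (B : List Int), Dom_probrem A B → Spec_probrem A B (probrem A B)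

-- ===== LEMMAS AND PROOFS =====

-- running prefix sums starting from s (proof-side model of B's prefix table)
def pvAccum : List Int → Int → List Int
  | [], _ => []
  | d :: r, s => (s + d) :: pvAccum r (s + d)

-- index of the first element satisfying p, or length (proof-side)
def pvFirst : List Int → (Int → Bool) → Nat
  | [], _ => 0
  | a :: r, p => if p a then 0 else pvFirst r p + 1

lemma pvAccum_length (l : List Int) (s : Int) : (pvAccum l s).length = l.length := by
  induction l generalizing s with
  | nil => rfl
  | cons a r ih => simp [pvAccum, ih]

lemma pvAccum_map (l : List Int) (s : Int) : pvAccum l s = (pvAccum l 0).map (fun t => s + t) := by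
  induction l generalizing s with
  | nil => rfl
  | cons a r ih =>
    simp only [pvAccum, List.map_cons, List.cons.injEq]
    refine ⟨by omega, ?_⟩
    rw [ih (s + a), ih (0 + a), List.map_map]
    congr 1
    funext t
    simp only [Function.comp_apply]
    omega

lemma pvFoldPre (pos : List Int) (s : Int) (acc : List Int) :
    (pos.foldl (fun (sp : Int × List Int) d => (sp.1 + d, sp.2 ++ [sp.1 + d])) (s, acc)).2
      = acc ++ pvAccum pos s := by
  induction pos generalizing s acc with
  | nil => simp [pvAccum]
  | cons d r ih => simp [pvAccum, List.foldl_cons, ih]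

lemma pvFoldPass (l : List (Int × Int)) (c df : Int) (acc : List Int) :
    l.foldl
      (fun (st : Int × Int × List Int) p =>
        let d := p.1 - p.2
        if d < 0 then (st.1 + 1, st.2.1 - d, st.2.2)
        else if d > 0 then (st.1, st.2.1, st.2.2 ++ [d])
        else st)
      (c, df, acc)
      = (c + ((l.map (fun p => p.1 - p.2)).map (fun x => if x < 0 then (1 : Int) else 0)).sum,
         df - ((l.map (fun p => p.1 - p.2)).filter (fun i => i < 0)).sum,
         acc ++ (l.map (fun p => p.1 - p.2)).filter (fun i => i > 0)) := by
  induction l generalizing c df acc with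
  | nil => simp
  | cons q r ih =>
    simp only [List.foldl_cons, List.map_cons]
    by_cases h1 : q.1 - q.2 < 0
    · have h2 : ¬ (0 < q.1 - q.2) := by omega
      rw [if_pos h1, ih]
      simp only [Prod.mk.injEq, List.sum_cons, List.filter_cons, gt_iff_lt]
      refine ⟨?_, ?_, ?_⟩ <;> simp [h1, h2] <;> omega
    · rw [if_neg h1]
      by_cases h2 : 0 < q.1 - q.2
      · rw [if_pos (by omega : q.1 - q.2 > 0), ih]
        simp only [Prod.mk.injEq, List.sum_cons, List.filter_cons, gt_iff_lt]
        refine ⟨?_, ?_, ?_⟩ <;> simp [h1, h2] <;> omega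
      · rw [if_neg (by omega : ¬ q.1 - q.2 > 0), ih]
        have h0 : q.1 - q.2 = 0 := by omega
        simp only [Prod.mk.injEq, List.sum_cons, List.filter_cons, gt_iff_lt]
        refine ⟨?_, ?_, ?_⟩ <;> simp [h1, h2, h0] <;> omega

lemma pvLoopA_shift (l : List Int) (ans s : Int) :
    probremLoopA l ans s = ans + probremLoopA l 0 s := by
  induction l generalizing ans s with
  | nil => simp [probremLoopA]
  | cons i r ih =>
    simp only [probremLoopA]
    by_cases h : s + i ≥ 0
    · simp [h]
    · rw [if_neg h, if_neg h, ih (ans + 1), ih (0 + 1)]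
      ring

-- A's scan in terms of the first covered prefix
lemma pvLoopA_first (l : List Int) (s : Int) :
    probremLoopA l 0 s =
      (if pvFirst (pvAccum l s) (fun t => 0 ≤ t) < l.length
       then (pvFirst (pvAccum l s) (fun t => 0 ≤ t) : Int) + 1
       else (l.length : Int)) := by
  induction l generalizing s with
  | nil => simp [probremLoopA, pvAccum, pvFirst]
  | cons i r ih =>
    simp only [probremLoopA, pvAccum, pvFirst, List.length_cons]
    by_cases h : s + i ≥ 0
    · have hp : decide (0 ≤ s + i) = true := by simpa using h
      simp [h, hp]
    · have hp : decide (0 ≤ s + i) = false := by simpa using h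
      rw [if_neg h, pvLoopA_shift r (0 + 1) (s + i), ih (s + i)]
      simp only [hp, Bool.false_eq_true, if_false]
      by_cases hlt : pvFirst (pvAccum r (s + i)) (fun t => decide (0 ≤ t)) < r.length
      · rw [if_pos hlt, if_pos (by omega)]
        push_cast
        ring
      · rw [if_neg hlt, if_neg (by omega)]
        push_cast
        ring

lemma pvFirst_le (l : List Int) (p : Int → Bool) : pvFirst l p ≤ l.length := by
  induction l with
  | nil => simp [pvFirst]
  | cons a r ih => by_cases h : p a <;> simp [pvFirst, h] <;> omega

lemma pvFirst_not (l : List Int) (p : Int → Bool) :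
    ∀ i < pvFirst l p, ¬ p (l.getD i 0) = true := by
  induction l with
  | nil => simp [pvFirst]
  | cons a r ih =>
    intro i hi
    by_cases h : p a
    · simp [pvFirst, h] at hi
    · simp only [pvFirst, h, Bool.false_eq_true, if_false] at hi
      cases i with
      | zero => simpa using h
      | succ j => exact ih j (by omega)

lemma pvFirst_holds (l : List Int) (p : Int → Bool) :
    pvFirst l p < l.length → p (l.getD (pvFirst l p) 0) = true := by
  induction l with
  | nil => simp [pvFirst]
  | cons a r ih =>
    intro hlt
    by_cases h : p a
    · simpa [pvFirst, h] using h
    · simp only [pvFirst, h, Bool.false_eq_true, if_false, List.length_cons] at hlt ⊢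
      exact ih (by omega)

lemma pvFirst_unique (l : List Int) (p : Int → Bool) (r : Nat)
    (hle : r ≤ l.length)
    (hnot : ∀ i < r, ¬ p (l.getD i 0) = true)
    (hyes : r < l.length → p (l.getD r 0) = true) : r = pvFirst l p := by
  rcases Nat.lt_trichotomy r (pvFirst l p) with h | h | h
  · exact absurd (hyes (by have := pvFirst_le l p; omega)) (pvFirst_not l p r h)
  · exact h
  · exact absurd (pvFirst_holds l p (by omega)) (hnot _ h)

lemma pvBsearch_spec (pre : List Int) (deficit : Int)
    (mono : ∀ i j, i ≤ j → j < pre.length →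
      (deficit ≤ pre.getD i 0) → deficit ≤ pre.getD j 0) :
    ∀ n lo hi, hi - lo = n → hi ≤ pre.length → lo ≤ hi →
      (∀ i < lo, ¬ (deficit ≤ pre.getD i 0)) →
      (∀ i, hi ≤ i → i < pre.length → deficit ≤ pre.getD i 0) →
      probremBsearch pre deficit lo hi = pvFirst pre (fun t => decide (deficit ≤ t)) := by
  intro n
  induction n using Nat.strong_induction_on with
  | _ n IH =>
    intro lo hi hn hhi hlohi hlow hhigh
    unfold probremBsearch
    by_cases h : lo < hi
    · rw [dif_pos h]
      by_cases hc : pre.getD ((lo + hi) / 2) 0 ≥ deficit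
      · rw [if_pos hc]
        refine IH ((lo + hi) / 2 - lo) (by omega) lo ((lo + hi) / 2) rfl (by omega) (by omega)
          hlow ?_
        intro i hmi hil
        exact mono ((lo + hi) / 2) i hmi hil hc
      · rw [if_neg hc]
        refine IH (hi - ((lo + hi) / 2 + 1)) (by omega) ((lo + hi) / 2 + 1) hi rfl hhi (by omega)
          ?_ hhigh
        intro i hi1 hP
        rcases Nat.lt_or_ge i lo with hcase | hcase
        · exact hlow i hcase hP
        · exact hc (mono i ((lo + hi) / 2) (by omega) (by omega) hP)
    · rw [dif_neg h]
      refine pvFirst_unique pre (fun t => decide (deficit ≤ t)) lo (by omega) ?_ ?_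
      · intro i hi_
        simpa using hlow i hi_
      · intro hlt
        simpa using hhigh lo (by omega) hlt

lemma pvAccum_lb (l : List Int) (hl : ∀ x ∈ l, 0 < x) (s : Int) :
    ∀ k < l.length, s ≤ (pvAccum l s).getD k 0 := by
  induction l generalizing s with
  | nil => intro k hk; simp at hk
  | cons a r ih =>
    intro k hk
    have ha : 0 < a := hl a (List.mem_cons_self)
    cases k with
    | zero => simp [pvAccum]; omega
    | succ j =>
      have := ih (fun x hx => hl x (List.mem_cons_of_mem _ hx)) (s + a) j
        (by simpa using Nat.lt_of_succ_lt_succ hk)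
      simp only [pvAccum, List.getD_cons_succ]
      omega

lemma pvAccum_mono (l : List Int) (hl : ∀ x ∈ l, 0 < x) (s : Int) :
    ∀ i j, i ≤ j → j < l.length →
      (pvAccum l s).getD i 0 ≤ (pvAccum l s).getD j 0 := by
  induction l generalizing s with
  | nil => intro i j _ hj; simp at hj
  | cons a r ih =>
    intro i j hij hj
    cases i with
    | zero =>
      cases j with
      | zero => exact le_refl _
      | succ j' =>
        have hlb := pvAccum_lb r (fun x hx => hl x (List.mem_cons_of_mem _ hx)) (s + a) j'
          (by simpa using Nat.lt_of_succ_lt_succ hj)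
        simp only [pvAccum, List.getD_cons_zero, List.getD_cons_succ]
        omega
    | succ i' =>
      cases j with
      | zero => omega
      | succ j' =>
        simp only [pvAccum, List.getD_cons_succ]
        exact ih (fun x hx => hl x (List.mem_cons_of_mem _ hx)) (s + a) i' j' (by omega)
          (by simpa using Nat.lt_of_succ_lt_succ hj)

lemma pvFirst_shift (l : List Int) (s : Int) :
    pvFirst (pvAccum l s) (fun t => decide (0 ≤ t))
      = pvFirst (pvAccum l 0) (fun t => decide (0 - s ≤ t)) := by
  rw [pvAccum_map l s]
  generalize pvAccum l 0 = m
  induction m with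
  | nil => rfl
  | cons a r ih =>
    simp only [List.map_cons, pvFirst]
    rw [ih, decide_eq_decide.mpr (by omega : (0 ≤ s + a) ↔ (0 - s ≤ a))]

-- ===== VERDICT (by name: the statement is the Claim_ definition above) =====
theorem probrem_spec : Claim_equal_probrem := by
  unfold Claim_equal_probrem
  intro A B _
  unfold Spec_probrem probrem probrem_alt
  simp only [pvFoldPass, List.nil_append, pvFoldPre]
  by_cases hsum : A.sum < B.sum
  · simp [hsum]
  · rw [if_neg hsum, if_neg hsum]
    set diffs := (A.zip B).map (fun p => p.1 - p.2) with hdiffs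
    set cnt := (diffs.map (fun x => if x < 0 then (1 : Int) else 0)).sum with hcnt
    by_cases hc : cnt = 0
    · simp [hc]
    · rw [if_neg hc, if_neg (by simpa using hc)]
      set pos := PySem.List.sorted (diffs.filter (fun i => i > 0)) (fun x => x) true with hpos
      have hposmem : ∀ x ∈ pos, 0 < x := by
        intro x hx
        rw [hpos, PySem.List.mem_sorted] at hx
        have := List.of_mem_filter hx
        simpa using this
      have hmono : ∀ i j, i ≤ j → j < (pvAccum pos 0).length →
          (0 - (diffs.filter (fun i => i < 0)).sum ≤ (pvAccum pos 0).getD i 0) →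
          0 - (diffs.filter (fun i => i < 0)).sum ≤ (pvAccum pos 0).getD j 0 := by
        intro i j hij hj hP
        have := pvAccum_mono pos hposmem 0 i j hij (by rwa [pvAccum_length] at hj)
        omega
      rw [pvBsearch_spec (pvAccum pos 0) (0 - (diffs.filter (fun i => i < 0)).sum) hmono
        ((pvAccum pos 0).length) 0 ((pvAccum pos 0).length) rfl (le_refl _) (Nat.zero_le _)
        (by omega) (by omega)]
      rw [pvLoopA_shift, pvLoopA_first, pvFirst_shift, pvAccum_length]
      set L := pos.length with hL
      set nn := pvFirst (pvAccum pos 0) (fun t => decide (0 - (diffs.filter (fun i => i < 0)).sum ≤ t)) with hnn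
      by_cases hlt : nn < L
      · rw [if_pos hlt]
        ring
      · rw [if_neg hlt]
        ring
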